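-- pv_equiv track=rewrite | github.com/ptyshevs/npuzzle | solver.py | line_to_tokens
-- ===== SOURCE A (Python) =====
-- def line_to_tokens(line):
--     tokens = []
--     for t in line.split(" "):
--         if not t:
--             continue
--         if t.startswith("#"):
--             break
--         if '#' in t:
--             tokens.append(t[:t.index("#")])
--             break
--         elif t == '\n':
--             continue
--         tokens.append(t)
--     return tokens
-- ===== SOURCE B (Python) =====
-- def line_to_tokens(line):
--     idx = line.find('#')
--     body = line if idx == -1 else line[:idx]
--     return [t for t in body.split(' ') if t and t != '\n']
-- ===== Notes on version B (the rewrite author's own statement) =====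
-- stated objective: simpler
-- what changed: Replaces the per-token branch-and-break scan with a truncate-first shape: cut the line at the first '#' with find, then split the remaining body once and keep it as a single filter pass.
-- intended difference: On lines where the chunk between the last space and the first '#' is exactly a newline character (e.g. '\n#'), A appends that bare '\n' to the result because the prefix taken before '#' bypasses A's own '\n' filter, while B filters it out; dropping the newline token is the intended behaviour, as A's elif t == '\n' branch shows. — e.g. on line_to_tokens("\n#"): A returns ["\n"], B returns []
import Mathlib
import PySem

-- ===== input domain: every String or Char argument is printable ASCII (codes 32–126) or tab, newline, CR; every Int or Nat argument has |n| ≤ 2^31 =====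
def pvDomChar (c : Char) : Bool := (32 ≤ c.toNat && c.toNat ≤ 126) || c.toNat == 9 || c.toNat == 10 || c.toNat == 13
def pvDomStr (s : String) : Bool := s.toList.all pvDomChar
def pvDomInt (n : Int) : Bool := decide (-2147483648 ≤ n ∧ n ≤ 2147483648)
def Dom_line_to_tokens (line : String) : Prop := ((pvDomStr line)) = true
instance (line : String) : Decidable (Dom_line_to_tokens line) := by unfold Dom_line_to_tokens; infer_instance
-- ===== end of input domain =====

-- B replaces A's per-token branch-and-break scan by truncating at the first '#' and filtering one split pass (objective: simpler).

-- ===== PORT A =====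
-- the for-loop with break/continue over line.split(" "), as structural recursion
def pvLoopA : List String → List String
  | [] => []
  | t :: rest =>
    if t = "" then pvLoopA rest                      -- if not t: continue
    else if PySem.Str.startswith t "#" then []       -- break
    else if PySem.Str.isIn "#" t then
      -- t[:t.index("#")]; index = find here since guarded by '#' in t
      [PySem.Str.slice t none (some (PySem.Str.find t "#"))]
    else if t = "\n" then pvLoopA rest               -- continue
    else t :: pvLoopA rest

def line_to_tokens (line : String) : List String :=
  -- split? is some: the separator " " is nonempty
  pvLoopA ((PySem.Str.split? line " ").getD [])

-- ===== PORT B =====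
def line_to_tokens_alt (line : String) : List String :=
  let idx := PySem.Str.find line "#"
  let body := if idx = -1 then line else PySem.Str.slice line none (some idx)
  ((PySem.Str.split? body " ").getD []).filter (fun t => decide (t ≠ "" ∧ t ≠ "\n"))

-- ===== PRECONDITION & SPEC =====
-- On lines where the chunk between the last space and the first '#' is exactly a newline character,
-- A appends that bare "\n" to the result (the prefix taken before '#' bypasses A's own "\n" filter),
-- while B filters it out; dropping it is the intended behaviour, as A's `elif t == '\n'` branch shows.
def D_line_to_tokens (line : String) : Prop :=
  '#' ∈ line.toList ∧
    (line.toList.take (line.toList.idxOf '#')).reverse.takeWhile (· ≠ ' ') = ['\n']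
instance (line : String) : Decidable (D_line_to_tokens line) := by unfold D_line_to_tokens; infer_instance

def Spec_line_to_tokens (line : String) (out : List String) : Prop :=
  ¬ D_line_to_tokens line → out = line_to_tokens_alt line
instance (line : String) (out : List String) : Decidable (Spec_line_to_tokens line out) := by
  unfold Spec_line_to_tokens; infer_instance

def pvDiffWitness_line_to_tokens : String := "\n#"
def pvDiffWitnessOut_line_to_tokens : (List String) × (List String) := (["\n"], [])

-- ===== CLAIM (what is proved, stated in full; the proofs are below) =====
def Claim_unchanged_line_to_tokens : Prop :=
  ∀ (line : String), Dom_line_to_tokens line → Spec_line_to_tokens line (line_to_tokens line)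
def Claim_changed_line_to_tokens : Prop :=
  Dom_line_to_tokens (pvDiffWitness_line_to_tokens) ∧
  D_line_to_tokens (pvDiffWitness_line_to_tokens) ∧
  line_to_tokens (pvDiffWitness_line_to_tokens) = pvDiffWitnessOut_line_to_tokens.1 ∧
  line_to_tokens_alt (pvDiffWitness_line_to_tokens) = pvDiffWitnessOut_line_to_tokens.2 ∧
  pvDiffWitnessOut_line_to_tokens.1 ≠ pvDiffWitnessOut_line_to_tokens.2
def Claim_exact_line_to_tokens : Prop :=
  ∀ (line : String), Dom_line_to_tokens line → D_line_to_tokens line →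
    line_to_tokens line ≠ line_to_tokens_alt line

-- ===== LEMMAS AND PROOFS =====

-- Python's `line.split(' ')` on characters, in structural form
def pvSplit : List Char → List (List Char)
  | [] => [[]]
  | c :: r => if c = ' ' then [] :: pvSplit r else (pvSplit r).modifyHead (c :: ·)

-- truncate the token list at the first token containing '#', keeping that token's prefix
def pvCut : List (List Char) → List (List Char)
  | [] => []
  | t :: r => if '#' ∈ t then [t.takeWhile (· ≠ '#')] else t :: pvCut r

-- the '#'-prefix of the first token containing '#'
def pvPref : List (List Char) → Option (List Char)
  | [] => none
  | t :: r => if '#' ∈ t then some (t.takeWhile (· ≠ '#')) else pvPref r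

-- A's loop at character level
def cLoopA : List (List Char) → List (List Char)
  | [] => []
  | t :: r =>
    if t = [] then cLoopA r
    else if PySem.Chars.startswith t ['#'] then []
    else if PySem.Chars.isIn ['#'] t then
      [PySem.Chars.slice t none (some (PySem.Chars.find t ['#']))]
    else if t = ['\n'] then cLoopA r
    else t :: cLoopA r

def pcTok (t : List Char) : Bool := decide (t ≠ [] ∧ t ≠ ['\n'])

lemma pvSplit_ne_nil (cs : List Char) : pvSplit cs ≠ [] := by
  induction cs with
  | nil => simp [pvSplit]
  | cons c r ih =>
    simp only [pvSplit]
    split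
    · simp
    · simpa [List.modifyHead_eq_nil_iff] using ih

lemma pvSplit_cons' (cs : List Char) : ∃ h tl, pvSplit cs = h :: tl := by
  rcases e : pvSplit cs with _ | ⟨a, b⟩
  · exact absurd e (pvSplit_ne_nil cs)
  · exact ⟨a, b, rfl⟩

lemma splitOn_go_eq (cs : List Char) : ∀ (fuel : Nat), cs.length < fuel →
    ∀ (cur : List Char) (acc : List (List Char)),
    PySem.Chars.splitOn.go [' '] fuel cs cur acc
      = acc.reverse ++ (pvSplit cs).modifyHead (cur.reverse ++ ·) := by
  induction cs with
  | nil =>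
    intro fuel hf cur acc
    cases fuel with
    | zero => omega
    | succ f => simp [PySem.Chars.splitOn.go, pvSplit]
  | cons c r ih =>
    intro fuel hf cur acc
    cases fuel with
    | zero => omega
    | succ f =>
      have hr : r.length < f := by simpa using hf
      obtain ⟨h0, tl, hsp⟩ := pvSplit_cons' r
      by_cases hc : c = ' '
      · subst hc
        simp [PySem.Chars.splitOn.go, List.isPrefixOf, ih f hr, pvSplit, hsp,
              List.modifyHead]
      · simp [PySem.Chars.splitOn.go, List.isPrefixOf, hc, Ne.symm hc, ih f hr,
              pvSplit, hsp, List.modifyHead]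

lemma splitOn_eq (cs : List Char) : PySem.Chars.splitOn cs [' '] = pvSplit cs := by
  obtain ⟨h0, tl, hsp⟩ := pvSplit_cons' cs
  simp [PySem.Chars.splitOn, splitOn_go_eq cs (cs.length + 1) (by omega), hsp,
        List.modifyHead]

lemma find_go_hash (cs : List Char) : ∀ (k : Nat),
    PySem.Chars.find.go ['#'] cs k
      = if '#' ∈ cs then ((k + cs.idxOf '#' : Nat) : Int) else -1 := by
  induction cs with
  | nil => intro k; simp [PySem.Chars.find.go]
  | cons c t ih =>
    intro k
    by_cases hc : c = '#'
    · subst hc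
      simp [PySem.Chars.find.go, List.isPrefixOf, List.idxOf_cons_self]
    · have hidx : List.idxOf '#' (c :: t) = (List.idxOf '#' t).succ :=
        List.idxOf_cons_ne t hc
      rw [PySem.Chars.find.go]
      rw [if_neg (by simp [List.isPrefixOf]; exact fun h => hc h.symm), ih (k + 1)]
      by_cases hm : '#' ∈ t
      · rw [if_pos hm, if_pos (show '#' ∈ c :: t from List.mem_cons_of_mem _ hm), hidx]
        push_cast; omega
      · rw [if_neg hm, if_neg (show ¬ '#' ∈ c :: t from by
          intro hmem
          rcases List.mem_cons.mp hmem with h' | h'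
          · exact hc h'.symm
          · exact hm h')]

lemma find_hash (cs : List Char) :
    PySem.Chars.find cs ['#'] = if '#' ∈ cs then ((cs.idxOf '#' : Nat) : Int) else -1 := by
  simpa using find_go_hash cs 0

lemma take_idxOf_eq_takeWhile (t : List Char) :
    t.take (t.idxOf '#') = t.takeWhile (· ≠ '#') := by
  induction t with
  | nil => simp
  | cons c r ih =>
    by_cases hc : c = '#'
    · subst hc; simp [List.idxOf_cons_self]
    · rw [List.idxOf_cons_ne r hc]
      simp [List.takeWhile_cons, hc, ih]

lemma str_nl : ("\n" : String) = String.ofList ['\n'] := by decide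

lemma strSlice_ofList (t : List Char) (b : Option Int) :
    PySem.Str.slice (String.ofList t) none b = String.ofList (PySem.Chars.slice t none b) := by
  have h := congrArg String.ofList (PySem.Str.toList_slice (String.ofList t) none b)
  rw [String.ofList_toList, String.toList_ofList] at h
  exact h

-- A's loop over string tokens = A's loop over char tokens
lemma loop_bridge (ts : List (List Char)) :
    pvLoopA (ts.map String.ofList) = (cLoopA ts).map String.ofList := by
  induction ts with
  | nil => simp [pvLoopA, cLoopA]
  | cons t r ih =>
    simp only [List.map_cons, pvLoopA, cLoopA]
    rw [PySem.Str.startswith_eq, PySem.Str.isIn_eq, PySem.Str.find_eq]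
    simp only [String.toList_ofList, String.ofList_eq_empty_iff, str_nl,
      String.ofList_inj]
    have hsl : PySem.Str.slice (String.ofList t) none
        (some (PySem.Chars.find t (String.toList "#")))
        = String.ofList (PySem.Chars.slice t none (some (PySem.Chars.find t ['#']))) := by
      rw [strSlice_ofList]; rfl
    split_ifs <;> simp_all [List.map_cons]

lemma A_char (line : String) :
    line_to_tokens line = (cLoopA (pvSplit line.toList)).map String.ofList := by
  have hs : PySem.Str.split? line " " = some ((pvSplit line.toList).map String.ofList) := by
    simp [PySem.Str.split?, PySem.Chars.split?, show (" " : String).toList = [' '] from rfl,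
          splitOn_eq]
  rw [line_to_tokens, hs]
  simpa using loop_bridge (pvSplit line.toList)

lemma filter_bridge (ts : List (List Char)) :
    (ts.map String.ofList).filter (fun t => decide (t ≠ "" ∧ t ≠ "\n"))
      = (ts.filter pcTok).map String.ofList := by
  rw [List.filter_map]
  congr 1
  apply List.filter_congr
  intro t _
  simp only [Function.comp, pcTok]
  apply decide_eq_decide.mpr
  constructor
  · rintro ⟨h1, h2⟩
    refine ⟨fun he => h1 ?_, fun he => h2 ?_⟩
    · rw [he, String.ofList_nil]
    · rw [he, ← str_nl]
  · rintro ⟨h1, h2⟩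
    refine ⟨fun he => h1 (String.ofList_eq_empty_iff.mp he), fun he => h2 ?_⟩
    rw [str_nl] at he
    exact String.ofList_inj.mp he

lemma B_char (line : String) :
    line_to_tokens_alt line
      = ((pvSplit (if '#' ∈ line.toList then line.toList.take (line.toList.idxOf '#')
                   else line.toList)).filter pcTok).map String.ofList := by
  rw [line_to_tokens_alt]
  have hf : PySem.Str.find line "#" = PySem.Chars.find line.toList ['#'] := by
    rw [PySem.Str.find_eq]; rfl
  by_cases hm : '#' ∈ line.toList
  · have hfv : PySem.Str.find line "#" = ((line.toList.idxOf '#' : Nat) : Int) := by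
      rw [hf, find_hash, if_pos hm]
    have hne2 : ¬ (((line.toList.idxOf '#' : Nat) : Int) = -1) := by omega
    simp only [hfv, hm, if_neg hne2, if_pos]
    have hbody : (PySem.Str.slice line none (some ((line.toList.idxOf '#' : Nat) : Int))).toList
        = line.toList.take (line.toList.idxOf '#') := by
      rw [PySem.Str.toList_slice]
      exact PySem.List.slice_to_natCast line.toList (line.toList.idxOf '#')
    have hs : PySem.Str.split? (PySem.Str.slice line none (some ((line.toList.idxOf '#' : Nat) : Int))) " "
        = some ((pvSplit (line.toList.take (line.toList.idxOf '#'))).map String.ofList) := by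
      simp [PySem.Str.split?, PySem.Chars.split?, hbody,
            show (" " : String).toList = [' '] from rfl, splitOn_eq]
    rw [hs]
    simpa using filter_bridge (pvSplit (line.toList.take (line.toList.idxOf '#')))
  · have hfv : PySem.Str.find line "#" = -1 := by rw [hf, find_hash, if_neg hm]
    simp only [hfv, hm, if_pos rfl, ite_false, if_true]
    have hs : PySem.Str.split? line " " = some ((pvSplit line.toList).map String.ofList) := by
      simp [PySem.Str.split?, PySem.Chars.split?, show (" " : String).toList = [' '] from rfl,
            splitOn_eq]
    rw [hs]
    simpa using filter_bridge (pvSplit line.toList)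

-- truncation: splitting the body = cutting the token list
lemma split_take_eq_cut (cs : List Char) (h : '#' ∈ cs) :
    pvSplit (cs.take (cs.idxOf '#')) = pvCut (pvSplit cs) := by
  induction cs with
  | nil => simp at h
  | cons c r ih =>
    by_cases hc : c = '#'
    · subst hc
      obtain ⟨h0, tl, hsp⟩ := pvSplit_cons' r
      simp [List.idxOf_cons_self, pvSplit, hsp, List.modifyHead, pvCut,
            List.takeWhile_cons]
    · have hm : '#' ∈ r := by
        rcases List.mem_cons.mp h with h' | h'
        · exact absurd h'.symm hc
        · exact h'
      rw [List.idxOf_cons_ne r hc]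
      by_cases hsp : c = ' '
      · subst hsp
        simp only [Nat.succ_eq_add_one, List.take_succ_cons, pvSplit, if_pos rfl]
        simp [pvCut, ih hm]
      · simp only [Nat.succ_eq_add_one, List.take_succ_cons, pvSplit, hsp, ite_false]
        obtain ⟨h0, tl, hspl⟩ := pvSplit_cons' r
        rw [ih hm, hspl]
        have hc' : ('#' : Char) ≠ c := fun h' => hc h'.symm
        by_cases hh : '#' ∈ h0
        · simp [pvCut, hh, hc, hc', List.modifyHead, List.takeWhile_cons]
        · simp [pvCut, hh, hc, hc', List.modifyHead, List.takeWhile_cons]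

lemma mem_mem_pvSplit {cs : List Char} {t : List Char} (ht : t ∈ pvSplit cs)
    {a : Char} (ha : a ∈ t) : a ∈ cs := by
  induction cs generalizing t with
  | nil =>
    simp [pvSplit] at ht
    subst ht; simp at ha
  | cons c r ih =>
    by_cases hc : c = ' '
    · subst hc
      have hps : pvSplit (' ' :: r) = [] :: pvSplit r := by simp [pvSplit]
      rw [hps] at ht
      rcases List.mem_cons.mp ht with ht' | ht'
      · subst ht'; simp at ha
      · exact List.mem_cons_of_mem _ (ih ht' ha)
    · obtain ⟨h0, tl, hsp⟩ := pvSplit_cons' r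
      have hps : pvSplit (c :: r) = (c :: h0) :: tl := by
        simp [pvSplit, hc, hsp, List.modifyHead]
      rw [hps] at ht
      rcases List.mem_cons.mp ht with ht' | ht'
      · subst ht'
        rcases List.mem_cons.mp ha with ha' | ha'
        · exact ha' ▸ List.mem_cons_self
        · exact List.mem_cons_of_mem _ (ih (by rw [hsp]; exact List.mem_cons_self) ha')
      · exact List.mem_cons_of_mem _ (ih (by rw [hsp]; exact List.mem_cons_of_mem _ ht') ha)

lemma cut_of_no_hash {ts : List (List Char)} (h : ∀ t ∈ ts, '#' ∉ t) : pvCut ts = ts := by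
  induction ts with
  | nil => rfl
  | cons t r ih =>
    have := h t List.mem_cons_self
    simp [pvCut, this, ih (fun t ht => h t (List.mem_cons_of_mem _ ht))]

lemma pref_of_no_hash {ts : List (List Char)} (h : ∀ t ∈ ts, '#' ∉ t) : pvPref ts = none := by
  induction ts with
  | nil => rfl
  | cons t r ih =>
    have := h t List.mem_cons_self
    simp [pvPref, this, ih (fun t ht => h t (List.mem_cons_of_mem _ ht))]

lemma startswith_hash_iff (t : List Char) :
    PySem.Chars.startswith t ['#'] = true ↔ ∃ r, t = '#' :: r := by
  cases t with
  | nil => simp [PySem.Chars.startswith, List.isPrefixOf]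
  | cons c r =>
    constructor
    · intro h
      have : '#' = c := by simpa [PySem.Chars.startswith, List.isPrefixOf] using h
      exact ⟨r, by rw [← this]⟩
    · rintro ⟨r', hr⟩
      rw [hr]
      simp [PySem.Chars.startswith, List.isPrefixOf]

lemma isIn_hash_iff (t : List Char) : PySem.Chars.isIn ['#'] t = true ↔ '#' ∈ t := by
  rw [show PySem.Chars.isIn ['#'] t = (PySem.Chars.find t ['#'] != -1) from rfl]
  rw [find_hash]
  by_cases hm : '#' ∈ t <;> simp [hm]

-- the loop agrees with filter-after-cut whenever the first '#'-prefix is not the bare newline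
lemma loop_eq_filter_cut (ts : List (List Char)) (h : pvPref ts ≠ some ['\n']) :
    cLoopA ts = (pvCut ts).filter pcTok := by
  induction ts with
  | nil => rfl
  | cons t r ih =>
    by_cases ht0 : t = []
    · subst ht0
      have hpr : pvPref ([] :: r) = pvPref r := by simp [pvPref]
      simp [cLoopA, pvCut, pcTok, List.filter_cons, ih (hpr ▸ h)]
    · by_cases hsw : PySem.Chars.startswith t ['#'] = true
      · obtain ⟨r', hr⟩ := (startswith_hash_iff t).mp hsw
        subst hr
        simp [cLoopA, hsw, pvCut, List.takeWhile_cons, List.filter_cons, pcTok]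
      · by_cases hm : '#' ∈ t
        · have hpref : pvPref (t :: r) = some (t.takeWhile (· ≠ '#')) := by
            simp [pvPref, hm]
          have hnl : t.takeWhile (· ≠ '#') ≠ ['\n'] := by
            intro he; exact h (by rw [hpref, he])
          have hfv : PySem.Chars.find t ['#'] = ((t.idxOf '#' : Nat) : Int) := by
            rw [find_hash, if_pos hm]
          have hsl : PySem.Chars.slice t none (some ((t.idxOf '#' : Nat) : Int))
              = t.takeWhile (· ≠ '#') := by
            rw [show PySem.Chars.slice t none (some ((t.idxOf '#' : Nat) : Int))
                  = PySem.List.slice t none (some ((t.idxOf '#' : Nat) : Int)) from rfl]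
            rw [PySem.List.slice_to_natCast, take_idxOf_eq_takeWhile]
          have htw_ne : t.takeWhile (· ≠ '#') ≠ [] := by
            cases t with
            | nil => exact absurd rfl ht0
            | cons c t' =>
              have hcc : c ≠ '#' := by
                intro hce; exact hsw ((startswith_hash_iff _).mpr ⟨t', by rw [hce]⟩)
              simp [List.takeWhile_cons, hcc]
          simp only [cLoopA, ht0, ite_false, hsw, Bool.false_eq_true,
                     (isIn_hash_iff t).mpr hm, ite_true, if_neg]
          rw [hfv, hsl]
          have hgoal : pcTok (List.takeWhile (fun x => !decide (x = '#')) t) = true := by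
            simp only [pcTok, decide_eq_true_eq]
            constructor
            · simpa using htw_ne
            · simpa using hnl
          simp [pvCut, hm, List.filter_cons, hgoal]
        · have hin : PySem.Chars.isIn ['#'] t ≠ true := by
            intro h'; exact hm ((isIn_hash_iff t).mp h')
          have hpref : pvPref (t :: r) = pvPref r := by simp [pvPref, hm]
          by_cases hnl : t = ['\n']
          · subst hnl
            simp [cLoopA, pvCut, hm, List.filter_cons, pcTok, ih (hpref ▸ h),
                  PySem.Chars.startswith, List.isPrefixOf, hin]
          · simp [cLoopA, ht0, hsw, hin, hnl, pvCut, hm, List.filter_cons, pcTok,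
                  ih (hpref ▸ h)]

lemma no_space_pvSplit {r : List Char} (h : ' ' ∉ r) : pvSplit r = [r] := by
  induction r with
  | nil => rfl
  | cons c t ih =>
    have hc : c ≠ ' ' := fun he => h (he ▸ List.mem_cons_self)
    rw [pvSplit, if_neg hc, ih (fun hm => h (List.mem_cons_of_mem _ hm))]
    rfl

lemma length_pvSplit (r : List Char) : (pvSplit r).length = r.count ' ' + 1 := by
  induction r with
  | nil => rfl
  | cons c t ih =>
    by_cases hc : c = ' '
    · subst hc; simp [pvSplit, ih, List.count_cons]
    · simp [pvSplit, hc, List.length_modifyHead, ih, List.count_cons, Ne.symm hc]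

lemma getLast?_pvSplit (u : List Char) :
    (pvSplit u).getLast? = some ((u.reverse.takeWhile (· ≠ ' ')).reverse) := by
  induction u with
  | nil => rfl
  | cons c r ih =>
    by_cases hc : c = ' '
    · subst hc
      obtain ⟨h0, tl, hsp⟩ := pvSplit_cons' r
      have hL : (pvSplit (' ' :: r)).getLast? = (pvSplit r).getLast? := by
        rw [pvSplit, if_pos rfl, hsp, List.getLast?_cons_cons]
      rw [hL, ih]
      have htw : (' ' :: r).reverse.takeWhile (fun x => decide (x ≠ ' '))
          = r.reverse.takeWhile (fun x => decide (x ≠ ' ')) := by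
        rw [List.reverse_cons, List.takeWhile_append]
        split
        · next hlen =>
          have heq : r.reverse.takeWhile (fun x => decide (x ≠ ' ')) = r.reverse :=
            (List.takeWhile_prefix _).eq_of_length hlen
          simpa using heq.symm
        · rfl
      rw [htw]
    · by_cases hspm : ' ' ∈ r
      · obtain ⟨h0, tl, hspl⟩ := pvSplit_cons' r
        have htl : tl ≠ [] := by
          intro he
          have hlen := length_pvSplit r
          rw [hspl, he] at hlen
          have hcount : 0 < r.count ' ' := List.count_pos_iff.mpr hspm
          simp at hlen; omega
        obtain ⟨x, xs, hxl⟩ : ∃ x xs, tl = x :: xs := by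
          rcases tl with _ | ⟨x, xs⟩
          · exact absurd rfl htl
          · exact ⟨x, xs, rfl⟩
        have hL : (pvSplit (c :: r)).getLast? = (pvSplit r).getLast? := by
          rw [pvSplit, if_neg hc, hspl, hxl, List.modifyHead, List.getLast?_cons_cons,
              List.getLast?_cons_cons]
        rw [hL, ih]
        have htw : (c :: r).reverse.takeWhile (fun x => decide (x ≠ ' '))
            = r.reverse.takeWhile (fun x => decide (x ≠ ' ')) := by
          rw [List.reverse_cons, List.takeWhile_append]
          split
          · next hlen =>
            have heq : r.reverse.takeWhile (fun x => decide (x ≠ ' ')) = r.reverse :=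
              (List.takeWhile_prefix _).eq_of_length hlen
            have hall : ∀ a ∈ r.reverse, (fun x => decide (x ≠ ' ')) a = true :=
              List.takeWhile_eq_self_iff.mp heq
            have := hall ' ' (by simpa using hspm)
            simp at this
          · rfl
        rw [htw]
      · rw [pvSplit, if_neg hc, no_space_pvSplit hspm]
        have hall : r.reverse.takeWhile (fun x => decide (x ≠ ' ')) = r.reverse :=
          List.takeWhile_eq_self_iff.mpr (by
            intro a ha
            simp only [decide_eq_true_eq, ne_eq]
            intro he
            exact hspm (he ▸ (List.mem_reverse.mp ha)))
        rw [List.reverse_cons, show List.modifyHead (fun x => c :: x) [r] = [c :: r] from rfl]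
        rw [List.takeWhile_append]
        have hall' : r.reverse.takeWhile (fun x => !decide (x = ' ')) = r.reverse := by
          simpa using hall
        simp [hall', hc]

lemma pref_isSome_of_mem {cs : List Char} (h : '#' ∈ cs) :
    ∃ w, pvPref (pvSplit cs) = some w := by
  induction cs with
  | nil => simp at h
  | cons c r ih =>
    by_cases hc : c = ' '
    · subst hc
      have hm : '#' ∈ r := by simpa using h
      obtain ⟨w, hw⟩ := ih hm
      exact ⟨w, by simpa [pvSplit, pvPref] using hw⟩
    · obtain ⟨h0, tl, hsp⟩ := pvSplit_cons' r
      by_cases hch : c = '#'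
      · subst hch
        exact ⟨('#' :: h0).takeWhile (· ≠ '#'),
          by simp [pvSplit, hsp, List.modifyHead, pvPref]⟩
      · have hm : '#' ∈ r := by
          rcases List.mem_cons.mp h with h' | h'
          · exact absurd h'.symm hch
          · exact h'
        obtain ⟨w, hw⟩ := ih hm
        rw [hsp, pvPref] at hw
        by_cases hh : '#' ∈ h0
        · exact ⟨(c :: h0).takeWhile (· ≠ '#'),
            by simp [pvSplit, hc, hsp, List.modifyHead, pvPref, hh, hch]⟩
        · rw [if_neg hh] at hw
          refine ⟨w, ?_⟩
          have hh' : '#' ∉ c :: h0 := by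
            intro hmem
            rcases List.mem_cons.mp hmem with h' | h'
            · exact hch h'.symm
            · exact hh h'
          simp only [pvSplit, hc, ite_false, hsp, List.modifyHead, pvPref, hh', if_neg]
          simpa using hw

lemma getLast?_pvCut {ts : List (List Char)} {w : List Char} (h : pvPref ts = some w) :
    (pvCut ts).getLast? = some w := by
  induction ts with
  | nil => simp [pvPref] at h
  | cons t r ih =>
    by_cases hm : '#' ∈ t
    · rw [pvPref, if_pos hm] at h
      rw [pvCut, if_pos hm]
      simpa using h
    · rw [pvPref, if_neg hm] at h
      have hlast := ih h
      have hne : pvCut r ≠ [] := by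
        intro he; rw [he] at hlast; simp at hlast
      obtain ⟨x, xs, hxl⟩ : ∃ x xs, pvCut r = x :: xs := by
        rcases e : pvCut r with _ | ⟨x, xs⟩
        · exact absurd e hne
        · exact ⟨x, xs, rfl⟩
      rw [pvCut, if_neg hm, hxl, List.getLast?_cons_cons, ← hxl, hlast]

-- the first '#'-prefix is the last chunk of the body before the first '#'
lemma pref_eq (cs : List Char) (h : '#' ∈ cs) :
    pvPref (pvSplit cs)
      = some (((cs.take (cs.idxOf '#')).reverse.takeWhile (· ≠ ' ')).reverse) := by
  obtain ⟨w, hw⟩ := pref_isSome_of_mem h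
  have h1 : (pvCut (pvSplit cs)).getLast? = some w := getLast?_pvCut hw
  rw [← split_take_eq_cut cs h, getLast?_pvSplit] at h1
  rw [hw]
  exact h1.symm

lemma main_char (cs : List Char)
    (h : ¬ ('#' ∈ cs ∧ (cs.take (cs.idxOf '#')).reverse.takeWhile (· ≠ ' ') = ['\n'])) :
    cLoopA (pvSplit cs)
      = (pvSplit (if '#' ∈ cs then cs.take (cs.idxOf '#') else cs)).filter pcTok := by
  by_cases hm : '#' ∈ cs
  · have hnl : (cs.take (cs.idxOf '#')).reverse.takeWhile (· ≠ ' ') ≠ ['\n'] :=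
      fun he => h ⟨hm, he⟩
    have hpref : pvPref (pvSplit cs) ≠ some ['\n'] := by
      rw [pref_eq cs hm]
      intro he
      have h2 := Option.some.inj he
      apply hnl
      have h3 := congrArg List.reverse h2
      simpa using h3
    rw [loop_eq_filter_cut _ hpref, if_pos hm, split_take_eq_cut cs hm]
  · have hno : ∀ t ∈ pvSplit cs, '#' ∉ t :=
      fun t ht hc => hm (mem_mem_pvSplit ht hc)
    rw [loop_eq_filter_cut _ (by rw [pref_of_no_hash hno]; simp), cut_of_no_hash hno,
        if_neg hm]

-- tight direction: inside D, A's result contains "\n" while B's never does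
lemma newline_mem_loop {ts : List (List Char)} (h : pvPref ts = some ['\n']) :
    ['\n'] ∈ cLoopA ts := by
  induction ts with
  | nil => simp [pvPref] at h
  | cons t r ih =>
    by_cases hm : '#' ∈ t
    · rw [pvPref, if_pos hm] at h
      have htw := Option.some.inj h
      have ht0 : t ≠ [] := by intro he; subst he; simp at hm
      have hsw : PySem.Chars.startswith t ['#'] ≠ true := by
        intro hsw
        obtain ⟨r', hr⟩ := (startswith_hash_iff t).mp hsw
        rw [hr] at htw; simp [List.takeWhile_cons] at htw
      have hfv : PySem.Chars.find t ['#'] = ((t.idxOf '#' : Nat) : Int) := by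
        rw [find_hash, if_pos hm]
      have hsl : PySem.Chars.slice t none (some ((t.idxOf '#' : Nat) : Int))
          = t.takeWhile (· ≠ '#') := by
        rw [show PySem.Chars.slice t none (some ((t.idxOf '#' : Nat) : Int))
              = PySem.List.slice t none (some ((t.idxOf '#' : Nat) : Int)) from rfl]
        rw [PySem.List.slice_to_natCast, take_idxOf_eq_takeWhile]
      simp only [cLoopA, ht0, ite_false, hsw, Bool.false_eq_true,
                 (isIn_hash_iff t).mpr hm, ite_true, if_neg]
      rw [hfv, hsl, htw]
      simp
    · have hsw : PySem.Chars.startswith t ['#'] ≠ true := by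
        intro hsw
        obtain ⟨r', hr⟩ := (startswith_hash_iff t).mp hsw
        exact hm (hr ▸ List.mem_cons_self)
      have hin : PySem.Chars.isIn ['#'] t ≠ true := by
        intro h'; exact hm ((isIn_hash_iff t).mp h')
      rw [pvPref, if_neg hm] at h
      have hmem := ih h
      by_cases ht0 : t = []
      · subst ht0; simpa [cLoopA] using hmem
      · by_cases hnl : t = ['\n']
        · subst hnl; simpa [cLoopA, hsw, hin] using hmem
        · simp only [cLoopA, ht0, ite_false, hsw, Bool.false_eq_true, hin, hnl,
                     if_neg]
          exact List.mem_cons_of_mem _ hmem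

-- ===== VERDICT (by name: the statement is the Claim_ definition above) =====
theorem line_to_tokens_spec : Claim_unchanged_line_to_tokens := by
  intro line _ hD
  rw [A_char, B_char, main_char line.toList (fun hc => hD hc)]

theorem line_to_tokens_changed : Claim_changed_line_to_tokens := by
  unfold Claim_changed_line_to_tokens; decide

theorem line_to_tokens_tight : Claim_exact_line_to_tokens := by
  intro line _ hD heq
  obtain ⟨hm, htw⟩ := hD
  have hpref : pvPref (pvSplit line.toList) = some ['\n'] := by
    rw [pref_eq _ hm, htw]; rfl
  have hA : ("\n" : String) ∈ line_to_tokens line := by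
    rw [A_char, str_nl]
    exact List.mem_map_of_mem (newline_mem_loop hpref)
  have hB : ("\n" : String) ∉ line_to_tokens_alt line := by
    rw [B_char]
    intro hmem
    obtain ⟨t, htf, hte⟩ := List.mem_map.mp hmem
    have ht : t = ['\n'] := by
      rw [str_nl] at hte
      exact String.ofList_inj.mp hte
    subst ht
    have hft := List.of_mem_filter htf
    simp [pcTok] at hft
  rw [heq] at hA
  exact hB hA
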